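-- pv_equiv track=rewrite | github.com/tgreaves/k-razy-shoot-out | pico8/scripts/convert_enemy_sprites.py | byte_to_pico8_row
-- ===== SOURCE A (Python) =====
-- def byte_to_pico8_row(byte_val, color=8):
--     """
--     Convert a byte to a PICO-8 sprite row.
--     Each bit becomes a hex digit: 0 for transparent, color for set bit.
--     """
--     result = ""
--     for bit in range(7, -1, -1):  # Process bits from left to right
--         if byte_val & (1 << bit):
--             result += f"{color:x}"  # Use specified color (8=red for enemies)
--         else:
--             result += "0"  # Transparent
--     return result
-- ===== SOURCE B (Python) =====
-- def byte_to_pico8_row(byte_val, color=8):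
--     # representation-then-map: 8-bit binary string, then one replace
--     return format(byte_val & 0xFF, '08b').replace('1', format(color, 'x'))
-- ===== Notes on version B (the rewrite author's own statement) =====
-- stated objective: idiomatic
-- what changed: A's explicit bit-masking loop appending one digit per bit is replaced by a representation-then-map step: build the 8-bit binary string with format(byte_val & 0xFF, '08b') and turn it into the row with a single str.replace('1', format(color, 'x')).
import Mathlib
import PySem

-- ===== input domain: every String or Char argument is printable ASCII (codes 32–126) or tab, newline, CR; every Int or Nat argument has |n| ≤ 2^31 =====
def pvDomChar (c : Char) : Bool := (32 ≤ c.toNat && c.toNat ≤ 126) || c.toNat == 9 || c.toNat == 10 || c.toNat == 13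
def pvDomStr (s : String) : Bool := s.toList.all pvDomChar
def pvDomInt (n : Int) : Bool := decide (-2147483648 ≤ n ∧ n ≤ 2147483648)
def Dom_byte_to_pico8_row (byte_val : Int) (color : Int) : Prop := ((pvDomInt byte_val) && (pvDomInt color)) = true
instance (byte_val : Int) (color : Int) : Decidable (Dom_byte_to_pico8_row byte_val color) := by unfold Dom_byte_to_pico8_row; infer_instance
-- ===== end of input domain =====

-- B replaces A's explicit bit-masking loop by a representation-then-map step
-- (8-bit binary string, then one str.replace); objective: idiomatic, same cost.


-- shared primitive: Python's format(n, 'x') / f"{n:x}" — lowercase hex digits,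
-- '-' in front for negatives, no prefix (exact; Nat.toDigits 16 emits lowercase a-f)
def pyHexChars (n : Int) : List Char :=
  if n < 0 then '-' :: Nat.toDigits 16 n.natAbs else Nat.toDigits 16 n.toNat

-- ===== PORT A =====
-- literal port of A's loop: for bit in range(7,-1,-1), append color hex or "0".
-- bit ∈ [7..0] is nonnegative, so `(1 : Int) <<< bit.toNat` is exactly Python's 1 << bit.
def byte_to_pico8_row (byte_val : Int) (color : Int) : String :=
  (PySem.List.pyRange 7 (-1) (-1)).foldl
    (fun result bit =>
      if PySem.Int.band byte_val ((1 : Int) <<< bit.toNat) ≠ 0 then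
        result ++ String.ofList (pyHexChars color)
      else
        result ++ "0") ""

-- ===== PORT B =====
-- literal port of Source B: format(byte_val & 0xFF, '08b') — for a nonnegative value this is
-- its binary digits zero-filled to width 8 — then .replace('1', format(color, 'x')).
def byte_to_pico8_row_alt (byte_val : Int) (color : Int) : String :=
  String.ofList
    (PySem.Chars.replace
      (PySem.Chars.zfill (PySem.Int.toBinChars (PySem.Int.band byte_val 255)) 8)
      ['1'] (pyHexChars color))

-- ===== PRECONDITION & SPEC =====
def Spec_byte_to_pico8_row (byte_val : Int) (color : Int) (out : String) : Prop := out = byte_to_pico8_row_alt byte_val color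
instance (byte_val : Int) (color : Int) (out : String) : Decidable (Spec_byte_to_pico8_row byte_val color out) := by unfold Spec_byte_to_pico8_row; infer_instance

-- ===== CLAIM (what is proved, stated in full; the proofs are below) =====
def Claim_equal_byte_to_pico8_row : Prop := ∀ (byte_val : Int) (color : Int), Dom_byte_to_pico8_row byte_val color → Spec_byte_to_pico8_row byte_val color (byte_to_pico8_row byte_val color)

-- ===== LEMMAS AND PROOFS =====

-- bits 7..0 of a byte value, and the row they spell with hex block hx
def pvBits (m : Nat) : List Bool :=
  [m.testBit 7, m.testBit 6, m.testBit 5, m.testBit 4,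
   m.testBit 3, m.testBit 2, m.testBit 1, m.testBit 0]

def pvCode (bs : List Bool) : List Char := bs.map (fun b => if b then '1' else '0')

def pvRow (bs : List Bool) (hx : List Char) : List Char :=
  bs.flatMap (fun b => if b then hx else ['0'])

-- a & 255 is a mod 256 (Python semantics on both sides)
theorem pv_band255 (a : Int) : PySem.Int.band a 255 = a % 256 := by
  have h255 : (0 : Int) ≤ 255 := by norm_num
  unfold PySem.Int.band
  split_ifs with h1
  · have hmod : a.toNat &&& 255 = a.toNat % 256 := Nat.and_two_pow_sub_one_eq_mod a.toNat 8
    simp only [show ((255 : Int).toNat = 255) from rfl]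
    omega
  · have hmod : (-a - 1).toNat &&& 255 = (-a - 1).toNat % 256 :=
      Nat.and_two_pow_sub_one_eq_mod (-a - 1).toNat 8
    have hcomm : 255 &&& (-a - 1).toNat = (-a - 1).toNat &&& 255 := Nat.land_comm _ _
    simp only [show ((255 : Int).toNat = 255) from rfl]
    rw [hcomm, hmod]
    omega

set_option maxRecDepth 8192 in
theorem pv_testBit_compl : ∀ x < 256, ∀ k < 8, (255 - x).testBit k = !x.testBit k := by
  decide

-- a & 2^k is nonzero iff bit k of (a mod 256) is set, for k < 8
theorem pv_band_pow (a : Int) (k : Nat) (hk : k < 8) :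
    (PySem.Int.band a (2 ^ k) ≠ 0) ↔ (a % 256).toNat.testBit k = true := by
  have hp2 : ((2 : Int) ^ k) = ((2 ^ k : Nat) : Int) := by push_cast; ring
  have hpos : (0 : Int) < 2 ^ k := by positivity
  have htn : ((2 : Int) ^ k).toNat = 2 ^ k := by rw [hp2]; exact Int.toNat_natCast _
  have h2k : (0 : Nat) < 2 ^ k := Nat.two_pow_pos k
  unfold PySem.Int.band
  split_ifs with h1 h2 h3
  · rw [htn, Nat.and_two_pow]
    have hm : (a % 256).toNat = a.toNat % 256 := by omega
    rw [hm, show ((256 : Nat) = 2 ^ 8) from rfl, Nat.testBit_mod_two_pow]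
    cases hb : a.toNat.testBit k <;> simp [hk]
  · exact absurd (le_of_lt hpos) h2
  · rw [htn, Nat.land_comm, Nat.and_two_pow]
    have hm : (a % 256).toNat = 255 - (-a - 1).toNat % 256 := by omega
    rw [hm, pv_testBit_compl ((-a - 1).toNat % 256) (by omega) k hk,
      show ((256 : Nat) = 2 ^ 8) from rfl, Nat.testBit_mod_two_pow]
    cases hb : (-a - 1).toNat.testBit k <;> simp [hk]
  · exact absurd (le_of_lt hpos) h3

-- B's binary string: for m < 256, zfill(format(m,'b'), 8) spells the 8 bits of m
set_option maxRecDepth 8192 in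
theorem pv_zfill_bits : ∀ m < 256,
    PySem.Chars.zfill (PySem.Int.toBinChars ((m : Nat) : Int)) 8 = pvCode (pvBits m) := by
  decide

-- str.replace on a '0'/'1' string with pattern "1": each '1' becomes hx
theorem pv_replace_go (hx : List Char) :
    ∀ (bs : List Bool) (fuel : Nat) (acc : List Char), (pvCode bs).length ≤ fuel →
      PySem.Chars.replace.go ['1'] hx fuel (pvCode bs) acc = acc.reverse ++ pvRow bs hx := by
  intro bs
  induction bs with
  | nil =>
      intro fuel acc _
      cases fuel <;> simp [pvCode, pvRow, PySem.Chars.replace.go]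
  | cons b rest ih =>
      intro fuel acc hf
      cases fuel with
      | zero => simp [pvCode] at hf
      | succ f =>
          have hf' : (pvCode rest).length ≤ f := by
        -- length (pvCode (b::rest)) = length (pvCode rest) + 1
            simp [pvCode] at hf ⊢; omega
          cases b
          · have := ih f ('0' :: acc) hf'
            rw [show pvCode (false :: rest) = '0' :: pvCode rest from rfl,
              PySem.Chars.replace.go]
            simp only [show List.isPrefixOf ['1'] ('0' :: pvCode rest) = false from by
              simp [List.isPrefixOf]]
            simpa [pvRow] using this
          · have := ih f (hx.reverse ++ acc) hf'
            rw [show pvCode (true :: rest) = '1' :: pvCode rest from rfl,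
              PySem.Chars.replace.go]
            simp only [show List.isPrefixOf ['1'] ('1' :: pvCode rest) = true from by
              simp [List.isPrefixOf]]
            simpa [pvRow] using this

theorem pv_replace_code (bs : List Bool) (hx : List Char) :
    PySem.Chars.replace (pvCode bs) ['1'] hx = pvRow bs hx := by
  unfold PySem.Chars.replace
  simpa using pv_replace_go hx bs (pvCode bs).length [] (le_refl _)

-- ===== VERDICT (by name: the statement is the Claim_ definition above) =====
theorem byte_to_pico8_row_spec : Claim_equal_byte_to_pico8_row := by
  intro byte_val color _
  unfold Spec_byte_to_pico8_row byte_to_pico8_row byte_to_pico8_row_alt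
  set m := (byte_val % 256).toNat with hm
  have hm256 : m < 256 := by omega
  have hband : PySem.Int.band byte_val 255 = ((m : Nat) : Int) := by
    rw [pv_band255]; omega
  rw [hband, pv_zfill_bits m hm256, pv_replace_code]
  have hrange : PySem.List.pyRange 7 (-1) (-1) = [7, 6, 5, 4, 3, 2, 1, 0] := by decide
  rw [hrange]
  have hcond : ∀ k : Nat, k < 8 →
      (PySem.Int.band byte_val ((1 : Int) <<< ((k : Nat) : Int)) ≠ 0) = (m.testBit k = true) := by
    intro k hk
    have hsh : (1 : Int) <<< ((k : Nat) : Int) = 2 ^ k := by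
      rw [show ((1 : Int) = ((1 : Nat) : Int)) from rfl, Int.shiftLeft_natCast]
      push_cast [Nat.shiftLeft_eq]
      ring
    rw [hsh, hm]
    exact propext (pv_band_pow byte_val k hk)
  have e7 := hcond 7 (by norm_num); have e6 := hcond 6 (by norm_num)
  have e5 := hcond 5 (by norm_num); have e4 := hcond 4 (by norm_num)
  have e3 := hcond 3 (by norm_num); have e2 := hcond 2 (by norm_num)
  have e1 := hcond 1 (by norm_num); have e0 := hcond 0 (by norm_num)
  simp only [List.foldl,
    show ((7 : Int).toNat = 7) from rfl, show ((6 : Int).toNat = 6) from rfl,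
    show ((5 : Int).toNat = 5) from rfl, show ((4 : Int).toNat = 4) from rfl,
    show ((3 : Int).toNat = 3) from rfl, show ((2 : Int).toNat = 2) from rfl,
    show ((1 : Int).toNat = 1) from rfl, show ((0 : Int).toNat = 0) from rfl,
    e7, e6, e5, e4, e3, e2, e1, e0]
  unfold pvRow pvBits
  cases m.testBit 7 <;> cases m.testBit 6 <;> cases m.testBit 5 <;> cases m.testBit 4 <;>
    cases m.testBit 3 <;> cases m.testBit 2 <;> cases m.testBit 1 <;> cases m.testBit 0 <;>
    · apply String.ext
      simp [String.toList_append, String.toList_ofList]
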